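-- pv_equiv track=rewrite | github.com/k-harada/AtCoder | ABC/ABC237/D.py | solve
-- ===== SOURCE A (Python) =====
-- from collections import deque
--
-- def solve(n, s):
--     queue = deque()
--     queue.append(n)
--     for i in range(n - 1, -1, -1):
--         if s[i] == "L":
--             queue.append(i)
--         else:
--             queue.appendleft(i)
--     res_list = list(queue)
--     return " ".join([str(r) for r in res_list])
-- ===== SOURCE B (Python) =====
-- def solve(n, s):
--     front = [i for i in range(n) if s[i] != "L"]
--     back = [i for i in range(n - 1, -1, -1) if s[i] == "L"]
--     return " ".join(str(r) for r in front + [n] + back)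
-- ===== Notes on version B (the rewrite author's own statement) =====
-- stated objective: simpler
-- what changed: Replaces the deque with two directed filtered scans: non-'L' indices ascending, then n, then 'L' indices descending, concatenated directly.
import Mathlib
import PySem

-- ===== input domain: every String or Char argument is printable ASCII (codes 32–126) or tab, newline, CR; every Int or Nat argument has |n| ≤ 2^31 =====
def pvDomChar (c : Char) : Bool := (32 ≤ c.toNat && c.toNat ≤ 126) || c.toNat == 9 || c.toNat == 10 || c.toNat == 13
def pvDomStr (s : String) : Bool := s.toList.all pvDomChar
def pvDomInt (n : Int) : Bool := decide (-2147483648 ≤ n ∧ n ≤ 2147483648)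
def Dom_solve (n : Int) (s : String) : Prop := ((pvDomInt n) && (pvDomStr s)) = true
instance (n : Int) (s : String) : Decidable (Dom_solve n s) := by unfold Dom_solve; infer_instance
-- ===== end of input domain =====

-- B replaces A's deque loop by two directed filtered scans concatenated around n (simpler decomposition, same cost).

-- ===== PORT A =====
-- deque: appendleft = cons at the front, append = snoc at the back
def solve (n : Int) (s : String) : String :=
  let queue : List Int :=
    (PySem.List.pyRange (n - 1) (-1) (-1)).foldl
      (fun q i => if PySem.Str.pyGet? s i == some 'L' then q ++ [i] else i :: q)
      [n]
  PySem.Str.join " " (queue.map PySem.Int.toStr)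

-- ===== PORT B =====
def solve_alt (n : Int) (s : String) : String :=
  let front := (PySem.List.pyRange 0 n 1).filter (fun i => !(PySem.Str.pyGet? s i == some 'L'))
  let back := (PySem.List.pyRange (n - 1) (-1) (-1)).filter (fun i => PySem.Str.pyGet? s i == some 'L')
  PySem.Str.join " " ((front ++ [n] ++ back).map PySem.Int.toStr)

-- ===== PRECONDITION & SPEC =====
-- A indexes s[i] for every 0 ≤ i < n, so Python raises IndexError when n > len(s); exactly those inputs are excluded.
def Pre_solve (n : Int) (s : String) : Prop := n ≤ (s.toList.length : Int)
instance (n : Int) (s : String) : Decidable (Pre_solve n s) := by unfold Pre_solve; infer_instance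
def pvWitness_solve : Int × String := (3, "LRL")
def Spec_solve (n : Int) (s : String) (out : String) : Prop := out = solve_alt n s
instance (n : Int) (s : String) (out : String) : Decidable (Spec_solve n s out) := by unfold Spec_solve; infer_instance

-- ===== CLAIM (what is proved, stated in full; the proofs are below) =====
def Claim_equal_solve : Prop := ∀ (n : Int) (s : String), Dom_solve n s → Pre_solve n s → Spec_solve n s (solve n s)

-- ===== LEMMAS AND PROOFS =====

theorem foldl_deque (f : Int → Bool) : ∀ (xs : List Int) (q : List Int),
    xs.foldl (fun q i => if f i then q ++ [i] else i :: q) q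
      = ((xs.filter (fun i => !f i)).reverse ++ q) ++ xs.filter f := by
  intro xs
  induction xs with
  | nil => intro q; simp
  | cons a t ih =>
    intro q
    by_cases h : f a = true <;> simp [List.foldl_cons, h, ih]

theorem countdown_range (n : Int) :
    PySem.List.pyRange (n - 1) (-1) (-1) = (PySem.List.pyRange 0 n 1).reverse := by
  rw [PySem.List.pyRange_neg_one_eq_reverse]
  norm_num

-- ===== VERDICT (by name: the statement is the Claim_ definition above) =====
theorem solve_spec : Claim_equal_solve := by
  intro n s _ _
  unfold Spec_solve solve solve_alt
  rw [foldl_deque, countdown_range]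
  simp [List.filter_reverse]
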